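-- pv_equiv track=rewrite | github.com/eunhee-dev/problem-solving | 0x09. bfs/1926번. 그림/solve.py | solve
-- ===== SOURCE A (Python) =====
-- from collections import deque
--
-- DIRECTIONS = [(1, 0), (0, 1), (-1, 0), (0, -1)]
--
-- def bfs(n: int, m: int, board: list[list[int]],
--         visited: list[list[bool]], start: tuple[int, int]) -> int:
--     """
--     Note:
--         `visited` 리스트는 함수 내부에서 직접 수정됩니다.
--         따라서 함수 내 변경 사항이 호출한 쪽의 원본 객체에 반영됩니다.
--     """
--
--     size = 1
--     queue = deque([start])
--     visited[start[0]][start[1]] = True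
--
--     while queue:
--         x, y = queue.popleft()
--         for dx, dy in DIRECTIONS:
--             nx, ny = x + dx, y + dy
--             if 0 <= nx < n and 0 <= ny < m and not visited[nx][ny] and board[nx][ny] == 1:
--                 visited[nx][ny] = True
--                 queue.append((nx, ny))
--                 size += 1
--     return size
--
-- def solve(n: int, m: int, board: list[list[int]]) -> tuple[int, int]:
--     paints_size = []
--     visited = [[False] * m for _ in range(n)]
--
--     for i in range(n):
--         for j in range(m):
--             if not visited[i][j] and board[i][j] == 1:
--                 size = bfs(n, m, board, visited, start=(i, j))
--                 paints_size.append(size)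
--     return len(paints_size), max(paints_size) if paints_size else 0
-- ===== SOURCE B (Python) =====
-- def solve(n: int, m: int, board: list[list[int]]) -> tuple[int, int]:
--     # Union of adjacent painted cells by explicit class relabelling (small class
--     # merged into large), instead of A's per-component BFS flood fill.
--     label = {}    # cell -> component id
--     members = {}  # id -> list of its cells ([] once absorbed into another id)
--     next_id = 0
--     for i in range(n):
--         for j in range(m):
--             if board[i][j] == 1:
--                 label[(i, j)] = next_id
--                 members[next_id] = [(i, j)]
--                 next_id += 1
--     for i in range(n):
--         for j in range(m):
--             if board[i][j] == 1:
--                 for ni, nj in ((i + 1, j), (i, j + 1)):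
--                     if ni < n and nj < m and board[ni][nj] == 1:
--                         a, b = label[(i, j)], label[(ni, nj)]
--                         if a != b:
--                             if len(members[a]) < len(members[b]):
--                                 a, b = b, a
--                             for c in members[b]:
--                                 label[c] = a
--                             members[a] = members[a] + members[b]
--                             members[b] = []
--     count = sum(1 for v in members.values() if v)
--     best = max((len(v) for v in members.values()), default=0)
--     return count, best
-- ===== Notes on version B (the rewrite author's own statement) =====
-- stated objective: alternative
-- what changed: Replaces A's per-component BFS flood fill (queue of frontier cells, visited matrix, list of sizes) by a merge-find component labelling: every painted cell first gets its own singleton class, then one scan over right/down edges merges the two classes of each adjacent painted pair by relabelling the smaller class into the larger; count and max size are read off the surviving classes.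
import Mathlib
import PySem

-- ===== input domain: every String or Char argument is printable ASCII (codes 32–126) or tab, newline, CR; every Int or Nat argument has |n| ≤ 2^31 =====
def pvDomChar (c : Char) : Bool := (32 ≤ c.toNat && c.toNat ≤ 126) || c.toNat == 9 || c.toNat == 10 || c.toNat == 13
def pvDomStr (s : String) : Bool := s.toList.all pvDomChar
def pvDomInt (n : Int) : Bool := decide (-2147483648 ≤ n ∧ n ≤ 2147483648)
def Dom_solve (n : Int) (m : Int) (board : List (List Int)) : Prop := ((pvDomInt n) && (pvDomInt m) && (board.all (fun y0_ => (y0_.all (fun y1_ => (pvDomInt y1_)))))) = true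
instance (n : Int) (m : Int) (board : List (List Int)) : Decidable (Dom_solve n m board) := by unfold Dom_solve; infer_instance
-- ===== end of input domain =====

-- B replaces A's per-component BFS flood fill by a merge-find component labelling:
-- singleton classes, then one scan over right/down edges merging the smaller class into the
-- larger by explicit relabelling; equal return value, no speed claim. Neither program
-- mutates its arguments.

-- board[x][y]; exact under Pre_solve, where every access has 0 ≤ x < n ≤ len(board) and 0 ≤ y < m ≤ len(board[x]).
def cellAt (board : List (List Int)) (x y : Int) : Int :=
  (PySem.List.pyGet? ((PySem.List.pyGet? board x).getD []) y).getD 0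

-- the in-bounds cells of the grid (used by the termination measure of A's BFS loop)
def pvCells (n m : Int) : Finset (Int × Int) :=
  (Finset.range n.toNat ×ˢ Finset.range m.toNat).image (fun p => ((p.1 : Int), (p.2 : Int)))

lemma mem_pvCells {n m : Int} {p : Int × Int} :
    p ∈ pvCells n m ↔ 0 ≤ p.1 ∧ p.1 < n ∧ 0 ≤ p.2 ∧ p.2 < m := by
  unfold pvCells
  simp only [Finset.mem_image, Finset.mem_product, Finset.mem_range, Prod.exists]
  constructor
  · rintro ⟨a, b, ⟨ha, hb⟩, hp⟩
    rw [← hp]; dsimp; omega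
  · rintro ⟨h1, h2, h3, h4⟩
    refine ⟨p.1.toNat, p.2.toNat, ⟨by omega, by omega⟩, ?_⟩
    rw [Int.toNat_of_nonneg h1, Int.toNat_of_nonneg h3]

-- ===== PORT A =====
-- DIRECTIONS
def pvDirs : List (Int × Int) := [(1, 0), (0, 1), (-1, 0), (0, -1)]

-- one iteration of A's `for dx, dy in DIRECTIONS` body; state = (visited, queue, size).
-- Python's boolean visited matrix is represented as the finite set of True cells (all reads are
-- membership tests and all writes set True, so this is exact).
def bfsStep (n m : Int) (board : List (List Int)) (x y : Int)
    (st : Finset (Int × Int) × List (Int × Int) × Int) (d : Int × Int) :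
    Finset (Int × Int) × List (Int × Int) × Int :=
  if 0 ≤ x + d.1 ∧ x + d.1 < n ∧ 0 ≤ y + d.2 ∧ y + d.2 < m ∧ (x + d.1, y + d.2) ∉ st.1 ∧
      cellAt board (x + d.1) (y + d.2) = 1 then
    (insert (x + d.1, y + d.2) st.1, st.2.1 ++ [(x + d.1, y + d.2)], st.2.2 + 1)
  else st

lemma bfsStep_measure (n m : Int) (board : List (List Int)) (x y : Int)
    (st : Finset (Int × Int) × List (Int × Int) × Int) (d : Int × Int) :
    2 * ((pvCells n m \ (bfsStep n m board x y st d).1).card) + (bfsStep n m board x y st d).2.1.length ≤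
    2 * ((pvCells n m \ st.1).card) + st.2.1.length := by
  unfold bfsStep
  split_ifs with h
  · obtain ⟨h1, h2, h3, h4, h5, h6⟩ := h
    have hq : (x + d.1, y + d.2) ∈ pvCells n m \ st.1 :=
      Finset.mem_sdiff.2 ⟨mem_pvCells.2 ⟨h1, h2, h3, h4⟩, h5⟩
    have he : pvCells n m \ insert (x + d.1, y + d.2) st.1 =
        (pvCells n m \ st.1).erase (x + d.1, y + d.2) := by
      ext a
      simp only [Finset.mem_sdiff, Finset.mem_erase, Finset.mem_insert]
      tauto
    have hpos : 0 < (pvCells n m \ st.1).card := Finset.card_pos.2 ⟨_, hq⟩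
    dsimp
    rw [he, Finset.card_erase_of_mem hq, List.length_append]
    simp only [List.length_singleton]
    omega
  · exact le_refl _

lemma bfsFold_measure (n m : Int) (board : List (List Int)) (x y : Int)
    (st : Finset (Int × Int) × List (Int × Int) × Int) :
    2 * ((pvCells n m \ (pvDirs.foldl (bfsStep n m board x y) st).1).card) +
      (pvDirs.foldl (bfsStep n m board x y) st).2.1.length ≤
    2 * ((pvCells n m \ st.1).card) + st.2.1.length := by
  simp only [pvDirs, List.foldl_cons, List.foldl_nil]
  exact le_trans (bfsStep_measure n m board x y _ _) (le_trans (bfsStep_measure n m board x y _ _)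
    (le_trans (bfsStep_measure n m board x y _ _) (bfsStep_measure n m board x y _ _)))

-- A's `while queue` loop; Python's bfs returns size and mutates visited, so the port returns both.
def bfsLoop (n m : Int) (board : List (List Int)) (v : Finset (Int × Int))
    (queue : List (Int × Int)) (size : Int) : Finset (Int × Int) × Int :=
  match queue with
  | [] => (v, size)
  | (x, y) :: rest =>
    let st := pvDirs.foldl (bfsStep n m board x y) (v, rest, size)
    bfsLoop n m board st.1 st.2.1 st.2.2
termination_by 2 * ((pvCells n m \ v).card) + queue.length
decreasing_by
  calc 2 * ((pvCells n m \ st.1).card) + st.2.1.length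
      ≤ 2 * ((pvCells n m \ v).card) + rest.length := bfsFold_measure n m board x y (v, rest, size)
    _ < 2 * ((pvCells n m \ v).card) + ((x, y) :: rest).length := by simp

-- Python's bfs(n, m, board, visited, start): queue = deque([start]); visited[start] = True; size = 1
def bfs (n m : Int) (board : List (List Int)) (visited : Finset (Int × Int))
    (start : Int × Int) : Finset (Int × Int) × Int :=
  bfsLoop n m board (insert start visited) [start] 1

-- body of A's inner `for j in range(m)` loop; state = (paints_size, visited)
def cellStepA (n m : Int) (board : List (List Int)) (i : Int)
    (st : List Int × Finset (Int × Int)) (j : Int) : List Int × Finset (Int × Int) :=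
  if (i, j) ∉ st.2 ∧ cellAt board i j = 1 then
    ((st.1 ++ [(bfs n m board st.2 (i, j)).2]), (bfs n m board st.2 (i, j)).1)
  else st

def rowStepA (n m : Int) (board : List (List Int)) (st : List Int × Finset (Int × Int))
    (i : Int) : List Int × Finset (Int × Int) :=
  (PySem.List.pyRange 0 m 1).foldl (cellStepA n m board i) st

def solve (n : Int) (m : Int) (board : List (List Int)) : Int × Int :=
  let r := (PySem.List.pyRange 0 n 1).foldl (rowStepA n m board) (([] : List Int), (∅ : Finset (Int × Int)))
  -- `max(paints_size) if paints_size else 0` : max? is none exactly on the empty list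
  ((r.1.length : Int), (PySem.List.max? r.1 (fun x => x)).getD 0)

-- ===== PORT B =====
-- pass 1: `label[(i, j)] = next_id; members[next_id] = [(i, j)]; next_id += 1`
-- state = (label, members, next_id)
def initStep (board : List (List Int)) (i : Int)
    (st : PySem.Dict (Int × Int) Int × PySem.Dict Int (List (Int × Int)) × Int) (j : Int) :
    PySem.Dict (Int × Int) Int × PySem.Dict Int (List (Int × Int)) × Int :=
  if cellAt board i j = 1 then
    (st.1.insert (i, j) st.2.2, st.2.1.insert st.2.2 [(i, j)], st.2.2 + 1)
  else st

def rowInit (board : List (List Int)) (m : Int)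
    (st : PySem.Dict (Int × Int) Int × PySem.Dict Int (List (Int × Int)) × Int) (i : Int) :
    PySem.Dict (Int × Int) Int × PySem.Dict Int (List (Int × Int)) × Int :=
  (PySem.List.pyRange 0 m 1).foldl (initStep board i) st

-- pass 2 body for one neighbour v of u (`if ni < n and nj < m and board[ni][nj] == 1: ...`).
-- `label[...]`/`members[...]` are read with `.getD`: under Pre_solve both keys are always
-- present (where Python would raise KeyError is unreachable), so this is exact.
def unionStep (n m : Int) (board : List (List Int)) (u v : Int × Int)
    (st : PySem.Dict (Int × Int) Int × PySem.Dict Int (List (Int × Int))) :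
    PySem.Dict (Int × Int) Int × PySem.Dict Int (List (Int × Int)) :=
  if v.1 < n ∧ v.2 < m ∧ cellAt board v.1 v.2 = 1 then
    let a0 := (st.1.get? u).getD 0
    let b0 := (st.1.get? v).getD 0
    if a0 ≠ b0 then
      -- `if len(members[a]) < len(members[b]): a, b = b, a`
      let ab := if ((st.2.get? a0).getD []).length < ((st.2.get? b0).getD []).length then (b0, a0)
        else (a0, b0)
      let mb := (st.2.get? ab.2).getD []
      -- `for c in members[b]: label[c] = a` ; `members[a] = members[a] + members[b]` ; `members[b] = []`
      (mb.foldl (fun L c => L.insert c ab.1) st.1,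
       (st.2.insert ab.1 (((st.2.get? ab.1).getD []) ++ mb)).insert ab.2 [])
    else st
  else st

-- `for ni, nj in ((i + 1, j), (i, j + 1)):` unrolled in order
def cellUnion (n m : Int) (board : List (List Int)) (i : Int)
    (st : PySem.Dict (Int × Int) Int × PySem.Dict Int (List (Int × Int))) (j : Int) :
    PySem.Dict (Int × Int) Int × PySem.Dict Int (List (Int × Int)) :=
  if cellAt board i j = 1 then
    unionStep n m board (i, j) (i, j + 1) (unionStep n m board (i, j) (i + 1, j) st)
  else st

def rowUnion (n m : Int) (board : List (List Int)) (i : Int)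
    (st : PySem.Dict (Int × Int) Int × PySem.Dict Int (List (Int × Int))) :
    PySem.Dict (Int × Int) Int × PySem.Dict Int (List (Int × Int)) :=
  (PySem.List.pyRange 0 m 1).foldl (cellUnion n m board i) st

def solve_alt (n : Int) (m : Int) (board : List (List Int)) : Int × Int :=
  let ini := (PySem.List.pyRange 0 n 1).foldl (rowInit board m)
    (PySem.Dict.empty, PySem.Dict.empty, (0 : Int))
  let fin := (PySem.List.pyRange 0 n 1).foldl (fun st i => rowUnion n m board i st)
    (ini.1, ini.2.1)
  let vals := fin.2.values
  -- `sum(1 for v in members.values() if v)` and `max((len(v) for v in members.values()), default=0)`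
  (vals.foldl (fun acc v => if v ≠ [] then acc + 1 else acc) 0,
   PySem.List.maxD (vals.map (fun v => (v.length : Int))) (fun x => x) 0)

-- ===== PRECONDITION & SPEC =====
-- Exactly where Python A returns: whenever both loops actually run (0 < n and 0 < m), the first n
-- rows must exist and have at least m entries; otherwise board is never indexed. Elsewhere A raises IndexError.
def Pre_solve (n : Int) (m : Int) (board : List (List Int)) : Prop :=
  0 < n → 0 < m → (n ≤ (board.length : Int) ∧ ∀ row ∈ board.take n.toNat, m ≤ (row.length : Int))
instance (n : Int) (m : Int) (board : List (List Int)) : Decidable (Pre_solve n m board) := by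
  unfold Pre_solve; infer_instance

def pvWitness_solve : Int × Int × List (List Int) := (2, 2, [[1, 0], [0, 1]])

def Spec_solve (n : Int) (m : Int) (board : List (List Int)) (out : Int × Int) : Prop := out = solve_alt n m board
instance (n : Int) (m : Int) (board : List (List Int)) (out : Int × Int) : Decidable (Spec_solve n m board out) := by unfold Spec_solve; infer_instance

-- ===== CLAIM (what is proved, stated in full; the proofs are below) =====
def Claim_equal_solve : Prop := ∀ (n : Int) (m : Int) (board : List (List Int)), Dom_solve n m board → Pre_solve n m board → Spec_solve n m board (solve n m board)

-- ===== LEMMAS AND PROOFS =====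

-- Both programs compute the connected components of the painted cells under 4-adjacency;
-- the common yardstick below is (number of components, largest component size).

-- 4-neighbourhood adjacency
def pvAdj (p q : Int × Int) : Prop :=
  (q.1 = p.1 + 1 ∧ q.2 = p.2) ∨ (q.1 = p.1 - 1 ∧ q.2 = p.2) ∨
  (q.1 = p.1 ∧ q.2 = p.2 + 1) ∨ (q.1 = p.1 ∧ q.2 = p.2 - 1)

-- one flood-fill expansion step, avoiding the previously visited set v₀
def pvRel (n m : Int) (board : List (List Int)) (v₀ : Finset (Int × Int)) (p q : Int × Int) : Prop :=
  q ∈ pvCells n m ∧ q ∉ v₀ ∧ cellAt board q.1 q.2 = 1 ∧ pvAdj p q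

def pvReach (n m : Int) (board : List (List Int)) (v₀ : Finset (Int × Int)) (s p : Int × Int) : Prop :=
  Relation.ReflTransGen (pvRel n m board v₀) s p

-- the painted in-bounds cells and their components
def pvCells1 (n m : Int) (board : List (List Int)) : Finset (Int × Int) :=
  (pvCells n m).filter (fun p => cellAt board p.1 p.2 = 1)

def pvConn (n m : Int) (board : List (List Int)) (p q : Int × Int) : Prop :=
  Relation.ReflTransGen (pvRel n m board ∅) p q

noncomputable def pvComp (n m : Int) (board : List (List Int)) (s : Int × Int) :
    Finset (Int × Int) :=
  @Finset.filter _ (fun q => pvConn n m board s q) (Classical.decPred _) (pvCells1 n m board)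

noncomputable def pvComps (n m : Int) (board : List (List Int)) : Finset (Finset (Int × Int)) :=
  (pvCells1 n m board).image (fun s => pvComp n m board s)

noncomputable def pvOut (n m : Int) (board : List (List Int)) : Int × Int :=
  (((pvComps n m board).card : Int), (((pvComps n m board).sup Finset.card : Nat) : Int))


lemma mem_pvCells1 {n m : Int} {board : List (List Int)} {p : Int × Int} :
    p ∈ pvCells1 n m board ↔ p ∈ pvCells n m ∧ cellAt board p.1 p.2 = 1 := by
  simp [pvCells1]

lemma pvRel_mem {n m : Int} {board : List (List Int)} {v₀ : Finset (Int × Int)} {p q : Int × Int}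
    (h : pvRel n m board v₀ p q) : q ∈ pvCells1 n m board :=
  mem_pvCells1.2 ⟨h.1, h.2.2.1⟩

lemma pvAdj_symm {p q : Int × Int} (h : pvAdj p q) : pvAdj q p := by
  unfold pvAdj at *
  rcases h with ⟨a, b⟩ | ⟨a, b⟩ | ⟨a, b⟩ | ⟨a, b⟩ <;> [skip; skip; skip; skip] <;> omega

lemma pvRel_symm {n m : Int} {board : List (List Int)} {p q : Int × Int}
    (hp : p ∈ pvCells1 n m board) (h : pvRel n m board ∅ p q) : pvRel n m board ∅ q p := by
  obtain ⟨h1, h2⟩ := mem_pvCells1.1 hp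
  exact ⟨h1, by simp, h2, pvAdj_symm h.2.2.2⟩

lemma pvConn_mem {n m : Int} {board : List (List Int)} {s p : Int × Int}
    (hs : s ∈ pvCells1 n m board) (h : pvConn n m board s p) : p ∈ pvCells1 n m board := by
  induction h with
  | refl => exact hs
  | tail _ hbc _ => exact pvRel_mem hbc

lemma pvConn_symm {n m : Int} {board : List (List Int)} {s p : Int × Int}
    (hs : s ∈ pvCells1 n m board) (h : pvConn n m board s p) : pvConn n m board p s := by
  induction h with
  | refl => exact Relation.ReflTransGen.refl
  | tail hab hbc ih =>
    exact Relation.ReflTransGen.head (pvRel_symm (pvConn_mem hs hab) hbc) ih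

-- a visited set that is a union of whole components: no Rel step leaves it
def pvClosed (n m : Int) (board : List (List Int)) (v : Finset (Int × Int)) : Prop :=
  ∀ p ∈ v, ∀ q, pvRel n m board ∅ p q → q ∈ v

lemma pvClosed_conn {n m : Int} {board : List (List Int)} {v : Finset (Int × Int)} {p q : Int × Int}
    (hv : pvClosed n m board v) (hp : p ∈ v) (h : pvConn n m board p q) : q ∈ v := by
  induction h with
  | refl => exact hp
  | tail _ hbc ih => exact hv _ ih _ hbc

lemma pvReach_imp_conn {n m : Int} {board : List (List Int)} {v₀ : Finset (Int × Int)}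
    {s p : Int × Int} (h : pvReach n m board v₀ s p) : pvConn n m board s p := by
  induction h with
  | refl => exact Relation.ReflTransGen.refl
  | tail _ hbc ih => exact Relation.ReflTransGen.tail ih ⟨hbc.1, by simp, hbc.2.2⟩

lemma pvReach_not_mem {n m : Int} {board : List (List Int)} {v₀ : Finset (Int × Int)}
    {s p : Int × Int} (hs : s ∉ v₀) (h : pvReach n m board v₀ s p) : p ∉ v₀ := by
  induction h with
  | refl => exact hs
  | tail _ hbc _ => exact hbc.2.1

lemma pvConn_imp_reach {n m : Int} {board : List (List Int)} {v : Finset (Int × Int)}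
    {s p : Int × Int} (hs : s ∈ pvCells1 n m board) (hsv : s ∉ v)
    (hv : pvClosed n m board v) (h : pvConn n m board s p) : pvReach n m board v s p := by
  induction h with
  | refl => exact Relation.ReflTransGen.refl
  | @tail b c hab hbc ih =>
    have hb : b ∈ pvCells1 n m board := pvConn_mem hs hab
    have hbv : b ∉ v := pvReach_not_mem hsv ih
    have hcv : c ∉ v := by
      intro hcv
      exact hbv (hv _ hcv _ (pvRel_symm hb hbc))
    exact Relation.ReflTransGen.tail ih ⟨hbc.1, hcv, hbc.2.2⟩

lemma mem_pvComp {n m : Int} {board : List (List Int)} {s p : Int × Int} :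
    p ∈ pvComp n m board s ↔ p ∈ pvCells1 n m board ∧ pvConn n m board s p := by
  unfold pvComp
  exact @Finset.mem_filter _ _ (Classical.decPred _) _ _

lemma pvComp_self {n m : Int} {board : List (List Int)} {s : Int × Int}
    (hs : s ∈ pvCells1 n m board) : s ∈ pvComp n m board s :=
  mem_pvComp.2 ⟨hs, Relation.ReflTransGen.refl⟩

lemma pvComp_eq_of_mem {n m : Int} {board : List (List Int)} {s t p : Int × Int}
    (hs : s ∈ pvCells1 n m board) (ht : t ∈ pvCells1 n m board)
    (hps : p ∈ pvComp n m board s) (hpt : p ∈ pvComp n m board t) :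
    pvComp n m board s = pvComp n m board t := by
  obtain ⟨hp1, hcs⟩ := mem_pvComp.1 hps
  obtain ⟨-, hct⟩ := mem_pvComp.1 hpt
  ext q
  simp only [mem_pvComp]
  constructor
  · rintro ⟨hq, hconn⟩
    exact ⟨hq, Relation.ReflTransGen.trans hct
      (Relation.ReflTransGen.trans (pvConn_symm hs hcs) hconn)⟩
  · rintro ⟨hq, hconn⟩
    exact ⟨hq, Relation.ReflTransGen.trans hcs
      (Relation.ReflTransGen.trans (pvConn_symm ht hct) hconn)⟩

lemma pvComp_closed {n m : Int} {board : List (List Int)} {s : Int × Int}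
    (hs : s ∈ pvCells1 n m board) : pvClosed n m board (pvComp n m board s) := by
  intro p hp q hr
  obtain ⟨hp1, hconn⟩ := mem_pvComp.1 hp
  exact mem_pvComp.2 ⟨pvRel_mem hr, Relation.ReflTransGen.tail hconn hr⟩

lemma pvComp_disjoint {n m : Int} {board : List (List Int)} {v : Finset (Int × Int)}
    {s : Int × Int} (hs : s ∈ pvCells1 n m board) (hsv : s ∉ v)
    (hv : pvClosed n m board v) : ∀ p ∈ pvComp n m board s, p ∉ v := by
  intro p hp hpv
  obtain ⟨hp1, hconn⟩ := mem_pvComp.1 hp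
  exact hsv (pvClosed_conn hv hpv (pvConn_symm hs hconn))

lemma pvComp_subset {n m : Int} {board : List (List Int)} {s : Int × Int} :
    pvComp n m board s ⊆ pvCells1 n m board := by
  intro q hq
  exact (mem_pvComp.1 hq).1

lemma pvComp_mem_comps {n m : Int} {board : List (List Int)} {s : Int × Int}
    (hs : s ∈ pvCells1 n m board) : pvComp n m board s ∈ pvComps n m board :=
  Finset.mem_image.2 ⟨s, hs, rfl⟩

-- what one pop-and-expand of A's BFS does to its (visited, pending, size) state
def pvStOK (n m : Int) (board : List (List Int)) (v₀ : Finset (Int × Int)) (x y : Int)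
    (st st' : Finset (Int × Int) × List (Int × Int) × Int) : Prop :=
  st.1 ⊆ st'.1 ∧
  (∀ p, p ∈ st'.2.1 ↔ p ∈ st.2.1 ∨ (p ∈ st'.1 ∧ p ∉ st.1)) ∧
  (∀ p, p ∈ st'.1 → p ∉ st.1 → pvRel n m board v₀ (x, y) p) ∧
  st'.2.2 + (st.1.card : Int) = st.2.2 + (st'.1.card : Int)

lemma pvStOK_trans {n m : Int} {board : List (List Int)} {v₀ : Finset (Int × Int)} {x y : Int}
    {st st1 st2 : Finset (Int × Int) × List (Int × Int) × Int}
    (h1 : pvStOK n m board v₀ x y st st1) (h2 : pvStOK n m board v₀ x y st1 st2) :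
    pvStOK n m board v₀ x y st st2 := by
  obtain ⟨a1, a2, a3, a4⟩ := h1
  obtain ⟨b1, b2, b3, b4⟩ := h2
  refine ⟨a1.trans b1, ?_, ?_, by omega⟩
  · intro p
    rw [b2 p, a2 p]
    constructor
    · rintro ((h | ⟨h, h'⟩) | ⟨h, h'⟩)
      · exact Or.inl h
      · exact Or.inr ⟨b1 h, h'⟩
      · exact Or.inr ⟨h, fun hc => h' (a1 hc)⟩
    · rintro (h | ⟨h, h'⟩)
      · exact Or.inl (Or.inl h)
      · by_cases hp : p ∈ st1.1
        · exact Or.inl (Or.inr ⟨hp, h'⟩)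
        · exact Or.inr ⟨h, hp⟩
  · intro p hp hnp
    by_cases hp1 : p ∈ st1.1
    · exact a3 p hp1 hnp
    · exact b3 p hp hp1

lemma bfsStep_ok (n m : Int) (board : List (List Int)) (v₀ : Finset (Int × Int)) (x y : Int)
    (st : Finset (Int × Int) × List (Int × Int) × Int) (d : Int × Int) (hd : d ∈ pvDirs)
    (hv0 : v₀ ⊆ st.1) :
    pvStOK n m board v₀ x y st (bfsStep n m board x y st d) ∧
    ((x + d.1, y + d.2) ∈ pvCells n m → cellAt board (x + d.1) (y + d.2) = 1 →
      (x + d.1, y + d.2) ∈ (bfsStep n m board x y st d).1) := by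
  unfold bfsStep
  split_ifs with h
  · obtain ⟨h1, h2, h3, h4, h5, h6⟩ := h
    refine ⟨⟨Finset.subset_insert _ _, ?_, ?_, ?_⟩, fun _ _ => Finset.mem_insert_self _ _⟩
    · intro p
      simp only [List.mem_append, List.mem_singleton, Finset.mem_insert]
      constructor
      · rintro (hp | rfl)
        · exact Or.inl hp
        · exact Or.inr ⟨Or.inl rfl, h5⟩
      · rintro (hp | ⟨hp | hp, hnp⟩)
        · exact Or.inl hp
        · exact Or.inr hp
        · exact absurd hp hnp
    · intro p hp hnp
      have hpq : p = (x + d.1, y + d.2) := by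
        rcases Finset.mem_insert.1 hp with h | h
        · exact h
        · exact absurd h hnp
      subst hpq
      refine ⟨mem_pvCells.2 ⟨h1, h2, h3, h4⟩, fun hc => h5 (hv0 hc), h6, ?_⟩
      simp only [pvDirs, List.mem_cons, List.not_mem_nil, or_false] at hd
      rcases hd with rfl | rfl | rfl | rfl <;> (unfold pvAdj; dsimp; omega)
    · dsimp
      rw [Finset.card_insert_of_notMem h5]
      push_cast
      ring
  · refine ⟨⟨Finset.Subset.refl _, ?_, ?_, by ring⟩, ?_⟩
    · intro p; tauto
    · intro p hp hnp; exact absurd hp hnp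
    · intro hmem hcell
      obtain ⟨h1, h2, h3, h4⟩ := mem_pvCells.1 hmem
      by_contra hc
      exact h ⟨h1, h2, h3, h4, hc, hcell⟩

lemma bfsProcess_ok (n m : Int) (board : List (List Int)) (v₀ : Finset (Int × Int)) (x y : Int)
    (st : Finset (Int × Int) × List (Int × Int) × Int) (hv0 : v₀ ⊆ st.1) :
    pvStOK n m board v₀ x y st (pvDirs.foldl (bfsStep n m board x y) st) ∧
    (∀ q, pvRel n m board v₀ (x, y) q → q ∈ (pvDirs.foldl (bfsStep n m board x y) st).1) := by
  have hfold : pvDirs.foldl (bfsStep n m board x y) st =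
      bfsStep n m board x y (bfsStep n m board x y (bfsStep n m board x y
        (bfsStep n m board x y st (1, 0)) (0, 1)) (-1, 0)) (0, -1) := by
    simp only [pvDirs, List.foldl_cons, List.foldl_nil]
  obtain ⟨k1, c1⟩ := bfsStep_ok n m board v₀ x y st (1, 0) (by simp [pvDirs]) hv0
  have hv1 : v₀ ⊆ (bfsStep n m board x y st (1, 0)).1 := hv0.trans k1.1
  obtain ⟨k2, c2⟩ := bfsStep_ok n m board v₀ x y _ (0, 1) (by simp [pvDirs]) hv1
  have hv2 := hv1.trans k2.1
  obtain ⟨k3, c3⟩ := bfsStep_ok n m board v₀ x y _ (-1, 0) (by simp [pvDirs]) hv2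
  have hv3 := hv2.trans k3.1
  obtain ⟨k4, c4⟩ := bfsStep_ok n m board v₀ x y _ (0, -1) (by simp [pvDirs]) hv3
  rw [hfold]
  refine ⟨pvStOK_trans (pvStOK_trans (pvStOK_trans k1 k2) k3) k4, ?_⟩
  dsimp only at c1 c2 c3 c4
  simp only [← sub_eq_add_neg, add_zero] at c1 c2 c3 c4
  intro q hrel
  obtain ⟨hqc, hqv, hqcell, hadj⟩ := hrel
  obtain ⟨q1, q2⟩ := q
  dsimp at hqcell
  rcases hadj with ⟨e1, e2⟩ | ⟨e1, e2⟩ | ⟨e1, e2⟩ | ⟨e1, e2⟩ <;> dsimp at e1 e2 <;> subst e1 <;> subst e2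
  · exact k4.1 (k3.1 (k2.1 (c1 hqc hqcell)))
  · exact k4.1 (c3 hqc hqcell)
  · exact k4.1 (k3.1 (c2 hqc hqcell))
  · exact c4 hqc hqcell

-- the invariant A's worklist loop maintains, and the characterisation of its result:
-- final visited = v₀ ∪ {reachable from s}, and size grows by exactly the number of new cells.
lemma bfsLoop_spec (n m : Int) (board : List (List Int)) (v₀ : Finset (Int × Int)) (s : Int × Int)
    (hs0 : s ∉ v₀) :
    ∀ (v : Finset (Int × Int)) (queue : List (Int × Int)) (size : Int),
    s ∈ v → v₀ ⊆ v →
    (∀ p ∈ queue, p ∈ v ∧ p ∉ v₀) →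
    (∀ p ∈ v, p ∉ v₀ → pvReach n m board v₀ s p) →
    (∀ p ∈ v, p ∉ v₀ → p ∉ queue → ∀ q, pvRel n m board v₀ p q → q ∈ v) →
    (∀ p, p ∈ (bfsLoop n m board v queue size).1 ↔ p ∈ v₀ ∨ pvReach n m board v₀ s p) ∧
    (bfsLoop n m board v queue size).2 + (v.card : Int) = size + ((bfsLoop n m board v queue size).1.card : Int) := by
  intro v queue size
  generalize hk : 2 * ((pvCells n m \ v).card) + queue.length = k
  induction k using Nat.strong_induction_on generalizing v queue size with
  | _ k IH =>
  intro hsv hv0 hq h3 h4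
  cases queue with
  | nil =>
    rw [bfsLoop]
    constructor
    · intro p
      constructor
      · intro hp
        by_cases hpv : p ∈ v₀
        · exact Or.inl hpv
        · exact Or.inr (h3 p hp hpv)
      · rintro (hp | hp)
        · exact hv0 hp
        · have key : ∀ r, pvReach n m board v₀ s r → r ∈ v ∧ r ∉ v₀ := by
            intro r hr
            induction hr with
            | refl => exact ⟨hsv, hs0⟩
            | tail hab hbc ih =>
              exact ⟨h4 _ ih.1 ih.2 (by simp) _ hbc, hbc.2.1⟩
          exact (key p hp).1
    · show (v, size).2 + (v.card : Int) = size + ((v, size).1.card : Int)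
      rfl
  | cons hd rest =>
    obtain ⟨x, y⟩ := hd
    rw [bfsLoop]
    subst hk
    set st := pvDirs.foldl (bfsStep n m board x y) (v, rest, size) with hstdef
    have hlt : 2 * ((pvCells n m \ st.1).card) + st.2.1.length <
        2 * ((pvCells n m \ v).card) + ((x, y) :: rest).length := by
      have hle := bfsFold_measure n m board x y (v, rest, size)
      dsimp only at hle
      rw [← hstdef] at hle
      simp only [List.length_cons]
      omega
    obtain ⟨hst, hcl⟩ := bfsProcess_ok n m board v₀ x y (v, rest, size) hv0
    obtain ⟨m1, m2, m3, m4⟩ := hst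
    dsimp only at m1 m2 m3 m4 hcl
    rw [← hstdef] at m1 m2 m3 m4 hcl
    have hxy := hq (x, y) (List.mem_cons_self)
    have inv1 : s ∈ st.1 := m1 hsv
    have inv2 : v₀ ⊆ st.1 := hv0.trans m1
    have inv3 : ∀ p ∈ st.2.1, p ∈ st.1 ∧ p ∉ v₀ := by
      intro p hp
      rcases (m2 p).1 hp with h | ⟨h, h'⟩
      · exact ⟨m1 (hq p (List.mem_cons_of_mem _ h)).1, (hq p (List.mem_cons_of_mem _ h)).2⟩
      · exact ⟨h, (m3 p h h').2.1⟩
    have inv4 : ∀ p ∈ st.1, p ∉ v₀ → pvReach n m board v₀ s p := by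
      intro p hp hnp
      by_cases hpv : p ∈ v
      · exact h3 p hpv hnp
      · exact Relation.ReflTransGen.tail (h3 (x, y) hxy.1 hxy.2) (m3 p hp hpv)
    have inv5 : ∀ p ∈ st.1, p ∉ v₀ → p ∉ st.2.1 → ∀ q, pvRel n m board v₀ p q → q ∈ st.1 := by
      intro p hp hnv0 hnp q hrel
      by_cases hpv : p ∈ v
      · by_cases hpxy : p = (x, y)
        · subst hpxy
          exact hcl q hrel
        · have hrest : p ∉ rest := fun hr => hnp ((m2 p).2 (Or.inl hr))
          have hqueue : p ∉ (x, y) :: rest := by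
            simp only [List.mem_cons]
            tauto
          exact m1 (h4 p hpv hnv0 hqueue q hrel)
      · exact absurd ((m2 p).2 (Or.inr ⟨hp, hpv⟩)) hnp
    obtain ⟨ih1, ih2⟩ := IH _ hlt st.1 st.2.1 st.2.2 rfl inv1 inv2 inv3 inv4 inv5
    exact ⟨ih1, by omega⟩

-- A's bfs from a fresh painted start cell visits exactly one whole component and returns its size
lemma bfs_spec {n m : Int} {board : List (List Int)} {v : Finset (Int × Int)} {s : Int × Int}
    (hv : pvClosed n m board v) (hs : s ∈ pvCells1 n m board) (hsv : s ∉ v) :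
    (bfs n m board v s).1 = v ∪ pvComp n m board s ∧
    (bfs n m board v s).2 = ((pvComp n m board s).card : Int) := by
  have hmem : s ∈ insert s v := Finset.mem_insert_self s v
  have hsub : v ⊆ insert s v := Finset.subset_insert s v
  have hq : ∀ p ∈ [s], p ∈ insert s v ∧ p ∉ v := by
    intro p hp
    simp only [List.mem_singleton] at hp
    subst hp
    exact ⟨hmem, hsv⟩
  have h3 : ∀ p ∈ insert s v, p ∉ v → pvReach n m board v s p := by
    intro p hp hnp
    have : p = s := by
      rcases Finset.mem_insert.1 hp with h | h
      · exact h
      · exact absurd h hnp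
    subst this
    exact Relation.ReflTransGen.refl
  have h4 : ∀ p ∈ insert s v, p ∉ v → p ∉ [s] → ∀ q, pvRel n m board v p q → q ∈ insert s v := by
    intro p hp hnp hns
    have : p = s := by
      rcases Finset.mem_insert.1 hp with h | h
      · exact h
      · exact absurd h hnp
    subst this
    exact absurd (List.mem_singleton.2 rfl) hns
  obtain ⟨hb1, hb2⟩ := bfsLoop_spec n m board v s hsv (insert s v) [s] 1 hmem hsub hq h3 h4
  have hreach : ∀ p, pvReach n m board v s p ↔ p ∈ pvComp n m board s := by
    intro p
    constructor
    · intro h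
      exact mem_pvComp.2 ⟨pvConn_mem hs (pvReach_imp_conn h), pvReach_imp_conn h⟩
    · intro h
      exact pvConn_imp_reach hs hsv hv (mem_pvComp.1 h).2
  have hset : (bfs n m board v s).1 = v ∪ pvComp n m board s := by
    ext p
    rw [Finset.mem_union]
    exact (hb1 p).trans (or_congr Iff.rfl (hreach p))
  refine ⟨hset, ?_⟩
  have hdisj : Disjoint v (pvComp n m board s) := by
    rw [Finset.disjoint_right]
    intro p hp
    exact pvComp_disjoint hs hsv hv p hp
  have hcard : ((bfs n m board v s).1).card = v.card + (pvComp n m board s).card := by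
    rw [hset, Finset.card_union_of_disjoint hdisj]
  have hins : (insert s v).card = v.card + 1 := Finset.card_insert_of_notMem hsv
  have hb2' : (bfs n m board v s).2 + ((insert s v).card : Int) =
      1 + (((bfs n m board v s).1).card : Int) := hb2
  rw [hcard, hins] at hb2'
  push_cast at hb2'
  omega

-- the components already fully swallowed by a visited set
noncomputable def pvCompsIn (n m : Int) (board : List (List Int)) (v : Finset (Int × Int)) :
    Finset (Finset (Int × Int)) :=
  @Finset.filter _ (fun C => C ⊆ v) (Classical.decPred _) (pvComps n m board)

lemma mem_pvCompsIn {n m : Int} {board : List (List Int)} {v C : Finset (Int × Int)} :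
    C ∈ pvCompsIn n m board v ↔ C ∈ pvComps n m board ∧ C ⊆ v := by
  unfold pvCompsIn
  exact @Finset.mem_filter _ _ (Classical.decPred _) _ _

lemma pvCompsIn_union {n m : Int} {board : List (List Int)} {v : Finset (Int × Int)}
    {s : Int × Int} (hv : pvClosed n m board v) (hvs : v ⊆ pvCells1 n m board)
    (hs : s ∈ pvCells1 n m board) (hsv : s ∉ v) :
    pvCompsIn n m board (v ∪ pvComp n m board s) =
      insert (pvComp n m board s) (pvCompsIn n m board v) ∧
    pvComp n m board s ∉ pvCompsIn n m board v := by
  constructor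
  · ext C
    simp only [mem_pvCompsIn, Finset.mem_insert]
    constructor
    · rintro ⟨hC, hsub⟩
      obtain ⟨t, ht, rfl⟩ := Finset.mem_image.1 hC
      by_cases hint : ∃ p, p ∈ pvComp n m board t ∧ p ∈ pvComp n m board s
      · obtain ⟨p, hp1, hp2⟩ := hint
        exact Or.inl (pvComp_eq_of_mem ht hs hp1 hp2)
      · push_neg at hint
        refine Or.inr ⟨hC, ?_⟩
        intro p hp
        rcases Finset.mem_union.1 (hsub hp) with h | h
        · exact h
        · exact absurd h (hint p hp)
    · rintro (rfl | ⟨hC, hsub⟩)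
      · exact ⟨pvComp_mem_comps hs, Finset.subset_union_right⟩
      · exact ⟨hC, hsub.trans Finset.subset_union_left⟩
  · intro hC
    obtain ⟨-, hsub⟩ := mem_pvCompsIn.1 hC
    exact hsv (hsub (pvComp_self hs))

-- the invariant of A's scan: visited is a union of whole components, and paints_size records
-- their count, running max and positivity
def InvA (n m : Int) (board : List (List Int)) (st : List Int × Finset (Int × Int)) : Prop :=
  st.2 ⊆ pvCells1 n m board ∧ pvClosed n m board st.2 ∧
  st.1.length = (pvCompsIn n m board st.2).card ∧
  st.1.foldl max 0 = (((pvCompsIn n m board st.2).sup Finset.card : Nat) : Int) ∧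
  ∀ x ∈ st.1, 1 ≤ x

lemma cellStepA_ok {n m : Int} {board : List (List Int)} {i j : Int}
    {st : List Int × Finset (Int × Int)} (hij : (i, j) ∈ pvCells n m) (h : InvA n m board st) :
    InvA n m board (cellStepA n m board i st j) ∧ st.2 ⊆ (cellStepA n m board i st j).2 ∧
    ((i, j) ∈ pvCells1 n m board → (i, j) ∈ (cellStepA n m board i st j).2) := by
  obtain ⟨h1, h2, h3, h4, h5⟩ := h
  unfold cellStepA
  split_ifs with hc
  · obtain ⟨hnv, hcell⟩ := hc
    have hs : (i, j) ∈ pvCells1 n m board := mem_pvCells1.2 ⟨hij, hcell⟩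
    obtain ⟨hset, hsize⟩ := bfs_spec h2 hs hnv
    obtain ⟨hin, hnotin⟩ := pvCompsIn_union h2 h1 hs hnv
    have hcompsub : pvComp n m board (i, j) ⊆ pvCells1 n m board := pvComp_subset
    have hpos : 1 ≤ ((pvComp n m board (i, j)).card : Int) := by
      have : 0 < (pvComp n m board (i, j)).card := Finset.card_pos.2 ⟨_, pvComp_self hs⟩
      omega
    refine ⟨⟨?_, ?_, ?_, ?_, ?_⟩, ?_, ?_⟩
    · dsimp
      rw [hset]
      exact Finset.union_subset h1 hcompsub
    · dsimp
      rw [hset]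
      intro p hp q hr
      rcases Finset.mem_union.1 hp with hp | hp
      · exact Finset.mem_union_left _ (h2 p hp q hr)
      · exact Finset.mem_union_right _ (pvComp_closed hs p hp q hr)
    · dsimp
      rw [hset, hin, List.length_append, List.length_singleton,
        Finset.card_insert_of_notMem hnotin, h3]
    · dsimp
      rw [hset, hin, List.foldl_append, List.foldl_cons, List.foldl_nil, h4, hsize,
        Finset.sup_insert]
      push_cast
      rw [max_comm]
    · intro x hx
      dsimp at hx
      rcases List.mem_append.1 hx with hx | hx
      · exact h5 x hx
      · rw [List.mem_singleton.1 hx, hsize]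
        exact hpos
    · dsimp
      rw [hset]
      exact Finset.subset_union_left
    · intro _
      dsimp
      rw [hset]
      exact Finset.mem_union_right _ (pvComp_self hs)
  · refine ⟨⟨h1, h2, h3, h4, h5⟩, Finset.Subset.refl _, ?_⟩
    intro hs
    rcases not_and_or.1 hc with hc' | hc'
    · exact not_not.1 hc'
    · exact absurd (mem_pvCells1.1 hs).2 hc'

lemma foldl_cellA_ok {n m : Int} {board : List (List Int)} {i : Int} (l : List Int)
    {st : List Int × Finset (Int × Int)} (hl : ∀ j ∈ l, (i, j) ∈ pvCells n m)
    (h : InvA n m board st) :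
    InvA n m board (l.foldl (cellStepA n m board i) st) ∧
    st.2 ⊆ (l.foldl (cellStepA n m board i) st).2 ∧
    (∀ j ∈ l, (i, j) ∈ pvCells1 n m board → (i, j) ∈ (l.foldl (cellStepA n m board i) st).2) := by
  induction l generalizing st with
  | nil => exact ⟨h, Finset.Subset.refl _, by simp⟩
  | cons j t ih =>
    obtain ⟨k1, k2, k3⟩ := cellStepA_ok (hl j List.mem_cons_self) h
    obtain ⟨g1, g2, g3⟩ := ih (fun j' hj' => hl j' (List.mem_cons_of_mem _ hj')) k1
    refine ⟨g1, k2.trans g2, ?_⟩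
    intro j' hj' hmem
    rcases List.mem_cons.1 hj' with rfl | hj'
    · exact g2 (k3 hmem)
    · exact g3 j' hj' hmem

lemma foldl_rowA_ok {n m : Int} {board : List (List Int)} (l : List Int)
    {st : List Int × Finset (Int × Int)} (hl : ∀ i ∈ l, 0 ≤ i ∧ i < n)
    (h : InvA n m board st) :
    InvA n m board (l.foldl (rowStepA n m board) st) ∧
    st.2 ⊆ (l.foldl (rowStepA n m board) st).2 ∧
    (∀ i ∈ l, ∀ j : Int, 0 ≤ j → j < m → (i, j) ∈ pvCells1 n m board →
      (i, j) ∈ (l.foldl (rowStepA n m board) st).2) := by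
  induction l generalizing st with
  | nil => exact ⟨h, Finset.Subset.refl _, by simp⟩
  | cons i t ih =>
    have hji : ∀ j ∈ PySem.List.pyRange 0 m 1, (i, j) ∈ pvCells n m := by
      intro j hj
      rw [PySem.List.mem_pyRange_one] at hj
      obtain ⟨hi1, hi2⟩ := hl i List.mem_cons_self
      exact mem_pvCells.2 ⟨hi1, hi2, hj.1, hj.2⟩
    obtain ⟨k1, k2, k3⟩ := foldl_cellA_ok (PySem.List.pyRange 0 m 1) hji h
    obtain ⟨g1, g2, g3⟩ := ih (fun i' hi' => hl i' (List.mem_cons_of_mem _ hi')) k1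
    refine ⟨g1, ?_, ?_⟩
    · exact (show st.2 ⊆ _ from k2).trans g2
    · intro i' hi' j hj1 hj2 hmem
      rcases List.mem_cons.1 hi' with rfl | hi'
      · exact g2 (k3 j (PySem.List.mem_pyRange_one.2 ⟨hj1, hj2⟩) hmem)
      · exact g3 i' hi' j hj1 hj2 hmem

lemma solve_eq_pvOut (n m : Int) (board : List (List Int)) :
    solve n m board = pvOut n m board := by
  have hbase : InvA n m board (([] : List Int), (∅ : Finset (Int × Int))) := by
    refine ⟨by simp, by simp [pvClosed], ?_, ?_, by simp⟩
    · have : pvCompsIn n m board ∅ = ∅ := by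
        rw [Finset.eq_empty_iff_forall_notMem]
        intro C hC
        obtain ⟨hC1, hC2⟩ := mem_pvCompsIn.1 hC
        obtain ⟨t, ht, rfl⟩ := Finset.mem_image.1 hC1
        exact absurd (hC2 (pvComp_self ht)) (Finset.notMem_empty _)
      simp [this]
    · have : pvCompsIn n m board ∅ = ∅ := by
        rw [Finset.eq_empty_iff_forall_notMem]
        intro C hC
        obtain ⟨hC1, hC2⟩ := mem_pvCompsIn.1 hC
        obtain ⟨t, ht, rfl⟩ := Finset.mem_image.1 hC1
        exact absurd (hC2 (pvComp_self ht)) (Finset.notMem_empty _)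
      simp [this]
  have hl : ∀ i ∈ PySem.List.pyRange 0 n 1, 0 ≤ i ∧ i < n := by
    intro i hi
    exact PySem.List.mem_pyRange_one.1 hi
  obtain ⟨g1, -, g3⟩ := foldl_rowA_ok (n := n) (m := m) (board := board)
    (PySem.List.pyRange 0 n 1) hl hbase
  set r := (PySem.List.pyRange 0 n 1).foldl (rowStepA n m board)
    (([] : List Int), (∅ : Finset (Int × Int))) with hr
  obtain ⟨h1, h2, h3, h4, h5⟩ := g1
  have hcover : r.2 = pvCells1 n m board := by
    apply Finset.Subset.antisymm h1
    intro p hp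
    obtain ⟨hb1, hb2, hb3, hb4⟩ := mem_pvCells.1 (mem_pvCells1.1 hp).1
    have := g3 p.1 (PySem.List.mem_pyRange_one.2 ⟨hb1, hb2⟩) p.2 hb3 hb4
    simpa using this hp
  have hcomps : pvCompsIn n m board r.2 = pvComps n m board := by
    rw [hcover]
    apply Finset.Subset.antisymm
    · intro C hC
      exact (mem_pvCompsIn.1 hC).1
    · intro C hC
      refine mem_pvCompsIn.2 ⟨hC, ?_⟩
      obtain ⟨t, ht, rfl⟩ := Finset.mem_image.1 hC
      exact pvComp_subset
  rw [hcomps] at h3 h4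
  show ((r.1.length : Int), (PySem.List.max? r.1 (fun x => x)).getD 0) = pvOut n m board
  unfold pvOut
  refine Prod.ext (by rw [h3]) ?_
  dsimp only
  rcases hl1 : r.1 with _ | ⟨x, t⟩
  · rw [hl1] at h4
    simp only [List.foldl_nil] at h4
    simp [PySem.List.max?, ← h4]
  · rw [hl1] at h4 h5
    have hx : (1 : Int) ≤ x := h5 x List.mem_cons_self
    rw [PySem.List.max?_id_cons]
    simp only [Option.getD_some]
    rw [List.foldl_cons] at h4
    rw [show max (0 : Int) x = x from max_eq_right (by omega)] at h4
    exact h4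


-- ---------- pass-over-the-grid plumbing ----------
-- the grid cells in scan order; both of B's double loops are folds over this list
def pvFlat (n m : Int) : List (Int × Int) :=
  (PySem.List.pyRange 0 n 1).flatMap (fun i => (PySem.List.pyRange 0 m 1).map (fun j => (i, j)))

lemma mem_pvFlat {n m : Int} {p : Int × Int} : p ∈ pvFlat n m ↔ p ∈ pvCells n m := by
  unfold pvFlat
  simp only [List.mem_flatMap, List.mem_map, PySem.List.mem_pyRange_one, mem_pvCells]
  constructor
  · rintro ⟨i, hi, j, hj, rfl⟩
    exact ⟨hi.1, hi.2, hj.1, hj.2⟩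
  · rintro ⟨h1, h2, h3, h4⟩
    exact ⟨p.1, ⟨h1, h2⟩, p.2, ⟨h3, h4⟩, rfl⟩

lemma nodup_pvFlat {n m : Int} : (pvFlat n m).Nodup := by
  unfold pvFlat
  rw [List.nodup_flatMap]
  constructor
  · intro i _
    exact (PySem.List.nodup_pyRange_one 0 m).map (fun a b hab => by
      simpa using congrArg Prod.snd hab)
  · refine (PySem.List.nodup_pyRange_one 0 n).imp ?_
    intro i i' hne
    intro x hx hx'
    simp only [List.mem_map] at hx hx'
    obtain ⟨j, -, rfl⟩ := hx
    obtain ⟨j', -, he⟩ := hx'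
    exact hne (by simpa using congrArg Prod.fst he.symm)

lemma initFold_eq (n m : Int) (board : List (List Int))
    (st : PySem.Dict (Int × Int) Int × PySem.Dict Int (List (Int × Int)) × Int) :
    (PySem.List.pyRange 0 n 1).foldl (rowInit board m) st =
    (pvFlat n m).foldl (fun st c => initStep board c.1 st c.2) st := by
  unfold pvFlat
  rw [List.foldl_flatMap]
  apply PySem.List.foldl_congr_mem
  intro acc i _
  unfold rowInit
  rw [List.foldl_map]

lemma unionFold_eq (n m : Int) (board : List (List Int))
    (st : PySem.Dict (Int × Int) Int × PySem.Dict Int (List (Int × Int))) :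
    (PySem.List.pyRange 0 n 1).foldl (fun st i => rowUnion n m board i st) st =
    (pvFlat n m).foldl (fun st c => cellUnion n m board c.1 st c.2) st := by
  unfold pvFlat
  rw [List.foldl_flatMap]
  apply PySem.List.foldl_congr_mem
  intro acc i _
  unfold rowUnion
  rw [List.foldl_map]

-- a relabel loop writes the same value at every key of the list
lemma get?_foldl_insert_const (L : PySem.Dict (Int × Int) Int) (cs : List (Int × Int)) (a : Int)
    (p : Int × Int) :
    (cs.foldl (fun L c => L.insert c a) L).get? p = if p ∈ cs then some a else L.get? p := by
  induction cs generalizing L with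
  | nil => simp
  | cons c t ih =>
    rw [List.foldl_cons, ih, PySem.Dict.get?_insert]
    by_cases hp : p ∈ t
    · rw [if_pos hp, if_pos (List.mem_cons_of_mem _ hp)]
    · rw [if_neg hp]
      by_cases hpc : p = c
      · rw [if_pos hpc, if_pos (List.mem_cons.2 (Or.inl hpc))]
      · rw [if_neg hpc, if_neg (by simp [hpc, hp])]

-- ---------- the invariant of B's merge pass ----------
-- label is defined exactly on the painted cells, members lists each class exactly,
-- and every class is connected
def InvB (n m : Int) (board : List (List Int)) (L : PySem.Dict (Int × Int) Int)
    (M : PySem.Dict Int (List (Int × Int))) : Prop :=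
  (∀ p, (L.get? p).isSome ↔ p ∈ pvCells1 n m board) ∧
  M.keys.Nodup ∧
  (∀ id cells, M.get? id = some cells → cells.Nodup ∧ ∀ p, p ∈ cells ↔ L.get? p = some id) ∧
  (∀ p id, L.get? p = some id → (M.get? id).isSome) ∧
  (∀ p q id, L.get? p = some id → L.get? q = some id → pvConn n m board p q)

-- merging class b into class a preserves the invariant, preserves every label equality,
-- and equalises the labels of the two linking cells
lemma merge_ok {n m : Int} {board : List (List Int)}
    {L : PySem.Dict (Int × Int) Int} {M : PySem.Dict Int (List (Int × Int))}
    (hInv : InvB n m board L M) {a b : Int} (hne : a ≠ b) {x y : Int × Int}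
    (hx : L.get? x = some a) (hy : L.get? y = some b)
    (hconnxy : pvConn n m board x y) :
    InvB n m board (((M.get? b).getD []).foldl (fun L c => L.insert c a) L)
      ((M.insert a (((M.get? a).getD []) ++ ((M.get? b).getD []))).insert b []) ∧
    (∀ p q, L.get? p = L.get? q →
      (((M.get? b).getD []).foldl (fun L c => L.insert c a) L).get? p =
      (((M.get? b).getD []).foldl (fun L c => L.insert c a) L).get? q) ∧
    ((((M.get? b).getD []).foldl (fun L c => L.insert c a) L).get? x =
      (((M.get? b).getD []).foldl (fun L c => L.insert c a) L).get? y) := by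
  obtain ⟨k1, k2, k3, k4, k5⟩ := hInv
  obtain ⟨mal, hmal⟩ := Option.isSome_iff_exists.1 (k4 x a hx)
  obtain ⟨mbl, hmbl⟩ := Option.isSome_iff_exists.1 (k4 y b hy)
  obtain ⟨hnda, hmema⟩ := k3 a mal hmal
  obtain ⟨hndb, hmemb⟩ := k3 b mbl hmbl
  rw [hmal, hmbl]
  simp only [Option.getD_some]
  have hlab' : ∀ p, (mbl.foldl (fun L c => L.insert c a) L).get? p =
      if L.get? p = some b then some a else L.get? p := by
    intro p
    rw [get?_foldl_insert_const]
    exact if_congr (hmemb p) rfl rfl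
  have hM' : ∀ id, (((M.insert a (mal ++ mbl)).insert b []).get? id) =
      if id = b then some [] else if id = a then some (mal ++ mbl) else M.get? id := by
    intro id
    rw [PySem.Dict.get?_insert, PySem.Dict.get?_insert]
  have hcells1 : ∀ p id, L.get? p = some id → p ∈ pvCells1 n m board := by
    intro p id hp
    exact (k1 p).1 (by rw [hp]; rfl)
  have hxc : x ∈ pvCells1 n m board := hcells1 x a hx
  have hyc : y ∈ pvCells1 n m board := hcells1 y b hy
  have hdisj : ∀ p, p ∈ mal → p ∈ mbl → False := by
    intro p hpa hpb
    have h1 := (hmema p).1 hpa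
    have h2 := (hmemb p).1 hpb
    rw [h1] at h2
    exact hne (Option.some_injective _ h2)
  refine ⟨⟨?_, ?_, ?_, ?_, ?_⟩, ?_, ?_⟩
  · intro p
    rw [hlab']
    by_cases hpb : L.get? p = some b
    · rw [if_pos hpb]
      simp only [Option.isSome_some, true_iff]
      exact hcells1 p b hpb
    · rw [if_neg hpb]
      exact k1 p
  · exact PySem.Dict.nodup_keys_insert _ _ _ (PySem.Dict.nodup_keys_insert _ _ _ k2)
  · intro id cells hcells
    rw [hM'] at hcells
    by_cases hib : id = b
    · rw [if_pos hib] at hcells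
      obtain rfl : ([] : List (Int × Int)) = cells := Option.some_injective _ hcells
      refine ⟨List.nodup_nil, ?_⟩
      intro p
      simp only [List.not_mem_nil, false_iff]
      rw [hlab', hib]
      by_cases hpb : L.get? p = some b
      · rw [if_pos hpb]
        intro hc
        exact hne (Option.some_injective _ hc)
      · rw [if_neg hpb]
        exact hpb
    · rw [if_neg hib] at hcells
      by_cases hia : id = a
      · rw [if_pos hia] at hcells
        rw [hia]
        obtain rfl : mal ++ mbl = cells := Option.some_injective _ hcells
        refine ⟨List.Nodup.append hnda hndb (fun p hpa hpb => hdisj p hpa hpb), ?_⟩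
        intro p
        rw [hlab', List.mem_append]
        by_cases hpb : L.get? p = some b
        · rw [if_pos hpb]
          simp only [iff_true]
          exact Or.inr ((hmemb p).2 hpb)
        · rw [if_neg hpb]
          constructor
          · rintro (hp | hp)
            · exact (hmema p).1 hp
            · exact absurd ((hmemb p).1 hp) hpb
          · intro hp
            exact Or.inl ((hmema p).2 hp)
      · rw [if_neg hia] at hcells
        obtain ⟨hnd, hmem⟩ := k3 id cells hcells
        refine ⟨hnd, ?_⟩
        intro p
        rw [hlab']
        by_cases hpb : L.get? p = some b
        · rw [if_pos hpb]
          constructor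
          · intro hp
            rw [(hmem p).1 hp] at hpb
            exact absurd (Option.some_injective _ hpb) hib
          · intro hc
            exact absurd (Option.some_injective _ hc) (Ne.symm hia)
        · rw [if_neg hpb]
          exact hmem p
  · intro p id hp
    rw [hlab'] at hp
    rw [hM']
    by_cases hib : id = b
    · simp [hib]
    · rw [if_neg hib]
      by_cases hia : id = a
      · simp [hia]
      · rw [if_neg hia]
        by_cases hpb : L.get? p = some b
        · rw [if_pos hpb] at hp
          exact absurd (Option.some_injective _ hp) (Ne.symm hia)
        · rw [if_neg hpb] at hp
          exact k4 p id hp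
  · -- connectivity of the merged classes
    have hsplit : ∀ r id, (if L.get? r = some b then some a else L.get? r) = some id →
        (L.get? r = some b ∧ id = a) ∨ L.get? r = some id := by
      intro r id h
      by_cases hrb : L.get? r = some b
      · rw [if_pos hrb] at h
        exact Or.inl ⟨hrb, (Option.some_injective _ h).symm⟩
      · rw [if_neg hrb] at h
        exact Or.inr h
    intro p q id hp hq
    rw [hlab'] at hp hq
    have hxy : pvConn n m board x y := hconnxy
    have hyx : pvConn n m board y x := pvConn_symm hxc hxy
    rcases hsplit p id hp with ⟨hpb, hida⟩ | hp'
    · rcases hsplit q id hq with ⟨hqb, -⟩ | hq'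
      · exact k5 p q b hpb hqb
      · -- p in old class b, q in old class a
        rw [hida] at hq'
        have h1 : pvConn n m board p y := k5 p y b hpb hy
        have h2 : pvConn n m board x q := k5 x q a hx hq'
        exact Relation.ReflTransGen.trans h1 (Relation.ReflTransGen.trans hyx h2)
    · rcases hsplit q id hq with ⟨hqb, hida⟩ | hq'
      · -- p in old class a, q in old class b
        rw [hida] at hp'
        have h1 : pvConn n m board p x := k5 p x a hp' hx
        have h2 : pvConn n m board y q := k5 y q b hy hqb
        exact Relation.ReflTransGen.trans h1 (Relation.ReflTransGen.trans hxy h2)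
      · exact k5 p q id hp' hq'
  · intro p q hpq
    rw [hlab', hlab', hpq]
  · rw [hlab', hlab', if_neg (by rw [hx]; intro hc; exact hne (Option.some_injective _ hc)),
      if_pos hy, hx]

lemma unionStep_ok {n m : Int} {board : List (List Int)} {u v : Int × Int}
    {st : PySem.Dict (Int × Int) Int × PySem.Dict Int (List (Int × Int))}
    (hInv : InvB n m board st.1 st.2) (hu : u ∈ pvCells1 n m board)
    (hadj : pvAdj u v) (hv1 : 0 ≤ v.1) (hv2 : 0 ≤ v.2) :
    InvB n m board (unionStep n m board u v st).1 (unionStep n m board u v st).2 ∧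
    (∀ p q, st.1.get? p = st.1.get? q →
      (unionStep n m board u v st).1.get? p = (unionStep n m board u v st).1.get? q) ∧
    (v ∈ pvCells1 n m board →
      (unionStep n m board u v st).1.get? u = (unionStep n m board u v st).1.get? v) := by
  obtain ⟨k1, k2, k3, k4, k5⟩ := hInv
  unfold unionStep
  by_cases hg : v.1 < n ∧ v.2 < m ∧ cellAt board v.1 v.2 = 1
  · rw [if_pos hg]
    have hvc : v ∈ pvCells1 n m board :=
      mem_pvCells1.2 ⟨mem_pvCells.2 ⟨hv1, hg.1, hv2, hg.2.1⟩, hg.2.2⟩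
    obtain ⟨a0, ha0⟩ := Option.isSome_iff_exists.1 ((k1 u).2 hu)
    obtain ⟨b0, hb0⟩ := Option.isSome_iff_exists.1 ((k1 v).2 hvc)
    have hconnuv : pvConn n m board u v :=
      Relation.ReflTransGen.single ⟨(mem_pvCells1.1 hvc).1, by simp, (mem_pvCells1.1 hvc).2, hadj⟩
    simp only [ha0, hb0, Option.getD_some]
    by_cases hab : a0 = b0
    · rw [if_neg (by simpa using hab)]
      refine ⟨⟨k1, k2, k3, k4, k5⟩, fun p q h => h, fun _ => ?_⟩
      rw [ha0, hb0, hab]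
    · rw [if_pos hab]
      by_cases hsw : ((st.2.get? a0).getD []).length < ((st.2.get? b0).getD []).length
      · rw [if_pos hsw]
        obtain ⟨g1, g2, g3⟩ := merge_ok ⟨k1, k2, k3, k4, k5⟩ (Ne.symm hab) hb0 ha0
          (pvConn_symm hu hconnuv)
        exact ⟨g1, g2, fun _ => g3.symm⟩
      · rw [if_neg hsw]
        obtain ⟨g1, g2, g3⟩ := merge_ok ⟨k1, k2, k3, k4, k5⟩ hab ha0 hb0 hconnuv
        exact ⟨g1, g2, fun _ => g3⟩
  · rw [if_neg hg]
    refine ⟨⟨k1, k2, k3, k4, k5⟩, fun p q h => h, fun hvc => ?_⟩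
    obtain ⟨-, h2, -, h4⟩ := mem_pvCells.1 (mem_pvCells1.1 hvc).1
    exact absurd ⟨h2, h4, (mem_pvCells1.1 hvc).2⟩ hg

lemma cellUnion_ok {n m : Int} {board : List (List Int)} {i j : Int}
    {st : PySem.Dict (Int × Int) Int × PySem.Dict Int (List (Int × Int))}
    (hin : (i, j) ∈ pvCells n m) (hInv : InvB n m board st.1 st.2) :
    InvB n m board (cellUnion n m board i st j).1 (cellUnion n m board i st j).2 ∧
    (∀ p q, st.1.get? p = st.1.get? q →
      (cellUnion n m board i st j).1.get? p = (cellUnion n m board i st j).1.get? q) ∧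
    ((i, j) ∈ pvCells1 n m board →
      ((i + 1, j) ∈ pvCells1 n m board →
        (cellUnion n m board i st j).1.get? (i, j) = (cellUnion n m board i st j).1.get? (i + 1, j)) ∧
      ((i, j + 1) ∈ pvCells1 n m board →
        (cellUnion n m board i st j).1.get? (i, j) = (cellUnion n m board i st j).1.get? (i, j + 1))) := by
  obtain ⟨h1, h2, h3, h4⟩ := mem_pvCells.1 hin
  unfold cellUnion
  by_cases hc : cellAt board i j = 1
  · rw [if_pos hc]
    have hu : (i, j) ∈ pvCells1 n m board := mem_pvCells1.2 ⟨hin, hc⟩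
    obtain ⟨g1, g2, g3⟩ := unionStep_ok (st := st) hInv hu
      (show pvAdj (i, j) (i + 1, j) from Or.inl ⟨rfl, rfl⟩) (by dsimp; omega) (by dsimp; omega)
    obtain ⟨f1, f2, f3⟩ := unionStep_ok (st := unionStep n m board (i, j) (i + 1, j) st) g1 hu
      (show pvAdj (i, j) (i, j + 1) from Or.inr (Or.inr (Or.inl ⟨rfl, rfl⟩))) (by dsimp; omega)
      (by dsimp; omega)
    refine ⟨f1, fun p q h => f2 p q (g2 p q h), fun _ => ⟨fun hn => ?_, fun hn => f3 hn⟩⟩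
    exact f2 _ _ (g3 hn)
  · rw [if_neg hc]
    refine ⟨hInv, fun p q h => h, fun hu => ?_⟩
    exact absurd (mem_pvCells1.1 hu).2 hc

lemma foldl_union_ok {n m : Int} {board : List (List Int)} (cs : List (Int × Int))
    {st : PySem.Dict (Int × Int) Int × PySem.Dict Int (List (Int × Int))}
    (hcs : ∀ p ∈ cs, p ∈ pvCells n m) (hInv : InvB n m board st.1 st.2) :
    InvB n m board (cs.foldl (fun st c => cellUnion n m board c.1 st c.2) st).1
      (cs.foldl (fun st c => cellUnion n m board c.1 st c.2) st).2 ∧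
    (∀ p q, st.1.get? p = st.1.get? q →
      (cs.foldl (fun st c => cellUnion n m board c.1 st c.2) st).1.get? p =
      (cs.foldl (fun st c => cellUnion n m board c.1 st c.2) st).1.get? q) ∧
    (∀ u ∈ cs, u ∈ pvCells1 n m board →
      ((u.1 + 1, u.2) ∈ pvCells1 n m board →
        (cs.foldl (fun st c => cellUnion n m board c.1 st c.2) st).1.get? u =
        (cs.foldl (fun st c => cellUnion n m board c.1 st c.2) st).1.get? (u.1 + 1, u.2)) ∧
      ((u.1, u.2 + 1) ∈ pvCells1 n m board →
        (cs.foldl (fun st c => cellUnion n m board c.1 st c.2) st).1.get? u =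
        (cs.foldl (fun st c => cellUnion n m board c.1 st c.2) st).1.get? (u.1, u.2 + 1))) := by
  induction cs generalizing st with
  | nil => exact ⟨hInv, fun p q h => h, by simp⟩
  | cons c t ih =>
    obtain ⟨ci, cj⟩ := c
    obtain ⟨g1, g2, g3⟩ := cellUnion_ok (hcs (ci, cj) List.mem_cons_self) hInv
    obtain ⟨f1, f2, f3⟩ := ih (fun p hp => hcs p (List.mem_cons_of_mem _ hp)) g1
    refine ⟨f1, fun p q h => f2 p q (g2 p q h), ?_⟩
    intro u hu humem
    rcases List.mem_cons.1 hu with rfl | hu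
    · obtain ⟨e1, e2⟩ := g3 humem
      exact ⟨fun hn => f2 _ _ (e1 hn), fun hn => f2 _ _ (e2 hn)⟩
    · exact f3 u hu humem

-- ---------- pass 1: fresh singleton classes ----------
def Inv1 (n m : Int) (board : List (List Int)) (L : PySem.Dict (Int × Int) Int)
    (M : PySem.Dict Int (List (Int × Int))) (nid : Int) : Prop :=
  M.keys.Nodup ∧
  (∀ id cells, M.get? id = some cells → cells.Nodup ∧ ∀ p, p ∈ cells ↔ L.get? p = some id) ∧
  (∀ p id, L.get? p = some id → (M.get? id).isSome) ∧
  (∀ p id, L.get? p = some id → id < nid) ∧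
  (∀ id, (M.get? id).isSome → id < nid) ∧
  (∀ p, (L.get? p).isSome → p ∈ pvCells1 n m board) ∧
  (∀ p q id, L.get? p = some id → L.get? q = some id → p = q)

lemma initStep_ok {n m : Int} {board : List (List Int)} {i j : Int}
    {st : PySem.Dict (Int × Int) Int × PySem.Dict Int (List (Int × Int)) × Int}
    (hin : (i, j) ∈ pvCells n m) (hnew : st.1.get? (i, j) = none)
    (h : Inv1 n m board st.1 st.2.1 st.2.2) :
    Inv1 n m board (initStep board i st j).1 (initStep board i st j).2.1 (initStep board i st j).2.2 ∧
    (∀ p, p ≠ (i, j) → (initStep board i st j).1.get? p = st.1.get? p) ∧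
    (∀ p, ((initStep board i st j).1.get? p).isSome ↔
      (st.1.get? p).isSome ∨ (p = (i, j) ∧ cellAt board i j = 1)) := by
  obtain ⟨k2, k3, k4, k5, k6, k7, k8⟩ := h
  unfold initStep
  by_cases hc : cellAt board i j = 1
  · rw [if_pos hc]
    have hlab' : ∀ p, (st.1.insert (i, j) st.2.2).get? p =
        if p = (i, j) then some st.2.2 else st.1.get? p := fun p => PySem.Dict.get?_insert _ _ _ _
    have hM' : ∀ id, (st.2.1.insert st.2.2 [(i, j)]).get? id =
        if id = st.2.2 then some [(i, j)] else st.2.1.get? id := fun id => PySem.Dict.get?_insert _ _ _ _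
    refine ⟨⟨PySem.Dict.nodup_keys_insert _ _ _ k2, ?_, ?_, ?_, ?_, ?_, ?_⟩, ?_, ?_⟩
    · intro id cells hcells
      rw [hM'] at hcells
      by_cases hid : id = st.2.2
      · rw [if_pos hid] at hcells
        obtain rfl : [(i, j)] = cells := Option.some_injective _ hcells
        refine ⟨List.nodup_singleton _, ?_⟩
        intro p
        rw [hlab', List.mem_singleton]
        by_cases hp : p = (i, j)
        · rw [if_pos hp, hid]
          simp [hp]
        · rw [if_neg hp]
          simp only [hp, false_iff]
          intro hcon
          rw [hid] at hcon
          exact absurd (k5 p st.2.2 hcon) (lt_irrefl _)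
      · rw [if_neg hid] at hcells
        obtain ⟨hnd, hmem⟩ := k3 id cells hcells
        refine ⟨hnd, ?_⟩
        intro p
        rw [hlab']
        by_cases hp : p = (i, j)
        · rw [if_pos hp]
          constructor
          · intro hpc
            rw [hp] at hpc
            rw [(hmem (i, j)).1 hpc] at hnew
            exact absurd hnew (by simp)
          · intro hcon
            exact absurd (Option.some_injective _ hcon).symm hid
        · rw [if_neg hp]
          exact hmem p
    · intro p id hp
      rw [hlab'] at hp
      rw [hM']
      by_cases hid : id = st.2.2
      · simp [hid]
      · rw [if_neg hid]
        by_cases hpij : p = (i, j)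
        · rw [if_pos hpij] at hp
          exact absurd (Option.some_injective _ hp).symm hid
        · rw [if_neg hpij] at hp
          exact k4 p id hp
    · intro p id hp
      rw [hlab'] at hp
      dsimp only
      by_cases hpij : p = (i, j)
      · rw [if_pos hpij] at hp
        have := (Option.some_injective _ hp).symm
        omega
      · rw [if_neg hpij] at hp
        have := k5 p id hp
        omega
    · intro id hid
      rw [hM'] at hid
      dsimp only
      by_cases h2 : id = st.2.2
      · omega
      · rw [if_neg h2] at hid
        have := k6 id hid
        omega
    · intro p hp
      rw [hlab'] at hp
      by_cases hpij : p = (i, j)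
      · rw [hpij]
        exact mem_pvCells1.2 ⟨hin, hc⟩
      · rw [if_neg hpij] at hp
        exact k7 p hp
    · intro p q id hp hq
      rw [hlab'] at hp hq
      by_cases hpij : p = (i, j) <;> by_cases hqij : q = (i, j)
      · rw [hpij, hqij]
      · rw [if_pos hpij] at hp
        rw [if_neg hqij] at hq
        obtain rfl : st.2.2 = id := Option.some_injective _ hp
        exact absurd (k5 q _ hq) (lt_irrefl _)
      · rw [if_neg hpij] at hp
        rw [if_pos hqij] at hq
        obtain rfl : st.2.2 = id := Option.some_injective _ hq
        exact absurd (k5 p _ hp) (lt_irrefl _)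
      · rw [if_neg hpij] at hp
        rw [if_neg hqij] at hq
        exact k8 p q id hp hq
    · intro p hp
      dsimp only
      rw [hlab', if_neg hp]
    · intro p
      dsimp only
      rw [hlab']
      by_cases hpij : p = (i, j)
      · rw [if_pos hpij]
        simp [hpij, hc]
      · rw [if_neg hpij]
        simp [hpij]
  · rw [if_neg hc]
    refine ⟨⟨k2, k3, k4, k5, k6, k7, k8⟩, fun p _ => rfl, ?_⟩
    intro p
    simp [hc]

lemma foldl_init_ok {n m : Int} {board : List (List Int)} (cs : List (Int × Int))
    {st : PySem.Dict (Int × Int) Int × PySem.Dict Int (List (Int × Int)) × Int}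
    (hcs : ∀ p ∈ cs, p ∈ pvCells n m) (hnd : cs.Nodup)
    (hfresh : ∀ p ∈ cs, st.1.get? p = none)
    (h : Inv1 n m board st.1 st.2.1 st.2.2) :
    Inv1 n m board (cs.foldl (fun st c => initStep board c.1 st c.2) st).1
      (cs.foldl (fun st c => initStep board c.1 st c.2) st).2.1
      (cs.foldl (fun st c => initStep board c.1 st c.2) st).2.2 ∧
    (∀ p, ((cs.foldl (fun st c => initStep board c.1 st c.2) st).1.get? p).isSome ↔
      (st.1.get? p).isSome ∨ (p ∈ cs ∧ cellAt board p.1 p.2 = 1)) := by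
  induction cs generalizing st with
  | nil => exact ⟨h, by simp⟩
  | cons c t ih =>
    obtain ⟨ci, cj⟩ := c
    obtain ⟨g1, g2, g3⟩ := initStep_ok (hcs (ci, cj) List.mem_cons_self)
      (hfresh (ci, cj) List.mem_cons_self) h
    have hfresh' : ∀ p ∈ t, (initStep board ci st cj).1.get? p = none := by
      intro p hp
      have hpne : p ≠ (ci, cj) := by
        intro hcon
        subst hcon
        exact (List.nodup_cons.1 hnd).1 hp
      rw [g2 p hpne]
      exact hfresh p (List.mem_cons_of_mem _ hp)
    obtain ⟨f1, f2⟩ := ih (fun p hp => hcs p (List.mem_cons_of_mem _ hp))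
      (List.nodup_cons.1 hnd).2 hfresh' g1
    refine ⟨f1, ?_⟩
    intro p
    simp only [List.foldl_cons]
    rw [f2 p, g3 p]
    simp only [List.mem_cons]
    constructor
    · rintro ((hp | hp) | hp)
      · exact Or.inl hp
      · exact Or.inr ⟨Or.inl hp.1, by rw [hp.1]; exact hp.2⟩
      · exact Or.inr ⟨Or.inr hp.1, hp.2⟩
    · rintro (hp | ⟨hp | hp, hcell⟩)
      · exact Or.inl (Or.inl hp)
      · exact Or.inl (Or.inr ⟨hp, by rw [hp] at hcell; exact hcell⟩)
      · exact Or.inr ⟨hp, hcell⟩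

-- after the merge pass: adjacent painted cells carry the same label
def pvLabClosed (n m : Int) (board : List (List Int)) (L : PySem.Dict (Int × Int) Int) : Prop :=
  ∀ u w, u ∈ pvCells1 n m board → w ∈ pvCells1 n m board → pvAdj u w → L.get? u = L.get? w

lemma lab_of_conn {n m : Int} {board : List (List Int)} {L : PySem.Dict (Int × Int) Int}
    (hk1 : ∀ p, (L.get? p).isSome ↔ p ∈ pvCells1 n m board)
    (hcl : pvLabClosed n m board L) {u w : Int × Int} {id : Int}
    (hu : L.get? u = some id) (hconn : pvConn n m board u w) : L.get? w = some id := by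
  induction hconn with
  | refl => exact hu
  | tail hab hbc ih =>
    rw [← hcl _ _ ((hk1 _).1 (by rw [ih]; rfl)) (pvRel_mem hbc) hbc.2.2.2]
    exact ih

lemma countB {n m : Int} {board : List (List Int)} {L : PySem.Dict (Int × Int) Int}
    {M : PySem.Dict Int (List (Int × Int))} (hInv : InvB n m board L M)
    (hcl : pvLabClosed n m board L) :
    M.values.foldl (fun acc v => if v ≠ [] then acc + 1 else acc) 0 = ((pvComps n m board).card : Int) ∧
    PySem.List.maxD (M.values.map (fun v => (v.length : Int))) (fun x => x) 0 =
      (((pvComps n m board).sup Finset.card : Nat) : Int) := by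
  obtain ⟨k1, k2, k3, k4, k5⟩ := hInv
  have hitems : ∀ id cells, (id, cells) ∈ M.items → M.get? id = some cells := by
    intro id cells h
    exact PySem.Dict.get?_of_mem_items _ h k2
  -- each nonempty class, read off any of its members, is exactly that member's component
  have htof : ∀ id cells p, M.get? id = some cells → p ∈ cells →
      cells.toFinset = pvComp n m board p := by
    intro id cells p hM hp
    have hexact := (k3 id cells hM).2
    have hlabp : L.get? p = some id := (hexact p).1 hp
    ext q
    rw [List.mem_toFinset, hexact q, mem_pvComp]
    constructor
    · intro hq
      exact ⟨(k1 q).1 (by rw [hq]; rfl), k5 p q id hlabp hq⟩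
    · rintro ⟨-, hconn⟩
      exact lab_of_conn k1 hcl hlabp hconn
  have hnditems : M.items.Nodup := List.Nodup.of_map _ k2
  set I := M.items.filter (fun it => decide (it.2 ≠ [])) with hI
  have hImem : ∀ it, it ∈ I ↔ it ∈ M.items ∧ it.2 ≠ [] := by
    intro it
    rw [hI, List.mem_filter, decide_eq_true_iff]
  have hmapnd : (I.map (fun it => it.2.toFinset)).Nodup := by
    refine List.Nodup.map_on ?_ (hnditems.filter _)
    intro x hx y hy hxy
    obtain ⟨hxi, hxne⟩ := (hImem x).1 hx
    obtain ⟨hyi, hyne⟩ := (hImem y).1 hy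
    obtain ⟨p, hp⟩ := List.exists_mem_of_ne_nil _ hxne
    have hpy : p ∈ y.2 := by
      rw [← List.mem_toFinset, ← hxy, List.mem_toFinset] at *
      exact hp
    have h1 : L.get? p = some x.1 := ((k3 x.1 x.2 (hitems _ _ hxi)).2 p).1 hp
    have h2 : L.get? p = some y.1 := ((k3 y.1 y.2 (hitems _ _ hyi)).2 p).1 hpy
    have hkey : x.1 = y.1 := Option.some_injective _ (h1.symm.trans h2)
    have hval : x.2 = y.2 := by
      have := hitems _ _ hxi
      rw [hkey] at this
      rw [hitems _ _ hyi] at this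
      exact (Option.some_injective _ this).symm
    exact Prod.ext hkey hval
  have hset : (I.map (fun it => it.2.toFinset)).toFinset = pvComps n m board := by
    ext C
    rw [List.mem_toFinset, List.mem_map]
    constructor
    · rintro ⟨it, hit, rfl⟩
      obtain ⟨hiti, hitne⟩ := (hImem it).1 hit
      obtain ⟨p, hp⟩ := List.exists_mem_of_ne_nil _ hitne
      have hM := hitems _ _ hiti
      have hlabp : L.get? p = some it.1 := ((k3 it.1 it.2 hM).2 p).1 hp
      rw [htof it.1 it.2 p hM hp]
      exact pvComp_mem_comps ((k1 p).1 (by rw [hlabp]; rfl))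
    · intro hC
      obtain ⟨s, hs, rfl⟩ := Finset.mem_image.1 hC
      obtain ⟨id, hid⟩ := Option.isSome_iff_exists.1 ((k1 s).2 hs)
      obtain ⟨cells, hcells⟩ := Option.isSome_iff_exists.1 (k4 s id hid)
      have hsc : s ∈ cells := ((k3 id cells hcells).2 s).2 hid
      refine ⟨(id, cells), (hImem _).2 ⟨PySem.Dict.mem_items_of_get?_eq_some _ hcells,
        List.ne_nil_of_mem hsc⟩, ?_⟩
      exact htof id cells s hcells hsc
  have hlen : (pvComps n m board).card = I.length := by
    rw [← hset, List.toFinset_card_of_nodup hmapnd, List.length_map]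
  constructor
  · rw [PySem.List.foldl_ite_add_one (p := fun v => v ≠ []), zero_add, hlen]
    have hv : M.values = M.items.map Prod.snd := rfl
    rw [hv, List.countP_map, List.countP_eq_length_filter]
    rfl
  · -- the running max over all class sizes is the largest component size
    have hlens_mem : ∀ x ∈ M.values.map (fun v => (v.length : Int)),
        0 ≤ x ∧ x ≤ (((pvComps n m board).sup Finset.card : Nat) : Int) := by
      intro x hx
      obtain ⟨v, hv, rfl⟩ := List.mem_map.1 hx
      refine ⟨by positivity, ?_⟩
      obtain ⟨it, hit, rfl⟩ := List.mem_map.1 hv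
      by_cases hne : it.2 = []
      · rw [hne]
        simp
      · obtain ⟨p, hp⟩ := List.exists_mem_of_ne_nil _ hne
        have hM := hitems _ _ hit
        have hcard : it.2.length = (pvComp n m board p).card := by
          rw [← htof it.1 it.2 p hM hp, List.toFinset_card_of_nodup (k3 it.1 it.2 hM).1]
        rw [hcard]
        have hlabp : L.get? p = some it.1 := ((k3 it.1 it.2 hM).2 p).1 hp
        have := Finset.le_sup (f := Finset.card)
          (pvComp_mem_comps ((k1 p).1 (by rw [hlabp]; rfl)))
        exact_mod_cast this
    have hcomps_mem : ∀ C ∈ pvComps n m board,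
        ((C.card : Nat) : Int) ∈ M.values.map (fun v => (v.length : Int)) := by
      intro C hC
      obtain ⟨s, hs, rfl⟩ := Finset.mem_image.1 hC
      obtain ⟨id, hid⟩ := Option.isSome_iff_exists.1 ((k1 s).2 hs)
      obtain ⟨cells, hcells⟩ := Option.isSome_iff_exists.1 (k4 s id hid)
      have hsc : s ∈ cells := ((k3 id cells hcells).2 s).2 hid
      have hcard : (pvComp n m board s).card = cells.length := by
        rw [← htof id cells s hcells hsc, List.toFinset_card_of_nodup (k3 id cells hcells).1]
      rw [hcard]
      refine List.mem_map.2 ⟨cells, ?_, rfl⟩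
      exact List.mem_map.2 ⟨(id, cells), PySem.Dict.mem_items_of_get?_eq_some _ hcells, rfl⟩
    unfold PySem.List.maxD
    cases hmax : PySem.List.max? (M.values.map (fun v => (v.length : Int))) (fun x => x) with
    | none =>
      rw [PySem.List.max?_eq_none_iff] at hmax
      have hempty : pvComps n m board = ∅ := by
        rw [Finset.eq_empty_iff_forall_notMem]
        intro C hC
        have := hcomps_mem C hC
        rw [hmax] at this
        exact absurd this (List.not_mem_nil)
      simp [hempty]
    | some w =>
      simp only [Option.getD_some]
      have hw_mem := PySem.List.max?_mem hmax
      have hw_le := (hlens_mem w hw_mem).2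
      have hw_nonneg := (hlens_mem w hw_mem).1
      refine le_antisymm ?_ hw_le |>.symm
      have hsup_le : (pvComps n m board).sup Finset.card ≤ w.toNat := by
        refine Finset.sup_le ?_
        intro C hC
        have h1 : ((C.card : Nat) : Int) ≤ w := PySem.List.max?_isMax hmax _ (hcomps_mem C hC)
        omega
      calc (((pvComps n m board).sup Finset.card : Nat) : Int)
          ≤ ((w.toNat : Nat) : Int) := by exact_mod_cast hsup_le
        _ = w := Int.toNat_of_nonneg hw_nonneg

lemma solve_alt_eq_pvOut (n m : Int) (board : List (List Int)) :
    solve_alt n m board = pvOut n m board := by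
  have hbase : Inv1 n m board PySem.Dict.empty PySem.Dict.empty 0 := by
    refine ⟨?_, ?_, ?_, ?_, ?_, ?_, ?_⟩
    · simp
    · intro id cells h; rw [PySem.Dict.get?_empty] at h; cases h
    · intro p id h; rw [PySem.Dict.get?_empty] at h; cases h
    · intro p id h; rw [PySem.Dict.get?_empty] at h; cases h
    · intro id h; rw [PySem.Dict.get?_empty] at h; simp at h
    · intro p h; rw [PySem.Dict.get?_empty] at h; simp at h
    · intro p q id h; rw [PySem.Dict.get?_empty] at h; cases h
  obtain ⟨hInv1, hdom⟩ := foldl_init_ok (n := n) (m := m) (board := board) (pvFlat n m)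
    (st := (PySem.Dict.empty, PySem.Dict.empty, (0 : Int)))
    (fun p hp => mem_pvFlat.1 hp) nodup_pvFlat (fun p _ => PySem.Dict.get?_empty _) hbase
  set ini := (pvFlat n m).foldl (fun st c => initStep board c.1 st c.2)
    (PySem.Dict.empty, PySem.Dict.empty, (0 : Int)) with hini
  obtain ⟨k2, k3, k4, k5, k6, k7, k8⟩ := hInv1
  have hk1 : ∀ p, ((ini.1).get? p).isSome ↔ p ∈ pvCells1 n m board := by
    intro p
    rw [hdom p, PySem.Dict.get?_empty]
    simp only [Option.isSome_none, Bool.false_eq_true, false_or]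
    rw [mem_pvFlat, mem_pvCells1]
  have hInvB : InvB n m board ini.1 ini.2.1 :=
    ⟨hk1, k2, k3, k4, fun p q id hp hq => (k8 p q id hp hq) ▸ Relation.ReflTransGen.refl⟩
  obtain ⟨hInvB', hpres, hjoin⟩ := foldl_union_ok (n := n) (m := m) (board := board)
    (pvFlat n m) (st := (ini.1, ini.2.1)) (fun p hp => mem_pvFlat.1 hp) hInvB
  set fin := (pvFlat n m).foldl (fun st c => cellUnion n m board c.1 st c.2) (ini.1, ini.2.1)
    with hfin
  have hcl : pvLabClosed n m board fin.1 := by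
    intro u w hu hw hadj
    rcases hadj with ⟨e1, e2⟩ | ⟨e1, e2⟩ | ⟨e1, e2⟩ | ⟨e1, e2⟩
    · have hwd : w = (u.1 + 1, u.2) := Prod.ext e1 e2
      rw [hwd]
      exact (hjoin u (mem_pvFlat.2 (mem_pvCells1.1 hu).1) hu).1 (hwd ▸ hw)
    · have hud : u = (w.1 + 1, w.2) := Prod.ext (by omega) e2.symm
      rw [hud]
      exact ((hjoin w (mem_pvFlat.2 (mem_pvCells1.1 hw).1) hw).1 (hud ▸ hu)).symm
    · have hwd : w = (u.1, u.2 + 1) := Prod.ext e1 e2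
      rw [hwd]
      exact (hjoin u (mem_pvFlat.2 (mem_pvCells1.1 hu).1) hu).2 (hwd ▸ hw)
    · have hud : u = (w.1, w.2 + 1) := Prod.ext e1.symm (by omega)
      rw [hud]
      exact ((hjoin w (mem_pvFlat.2 (mem_pvCells1.1 hw).1) hw).2 (hud ▸ hu)).symm
  obtain ⟨hcount, hmax⟩ := countB hInvB' hcl
  unfold solve_alt
  simp only [initFold_eq, unionFold_eq]
  rw [← hini, ← hfin, hcount, hmax]
  rfl

-- ===== VERDICT (by name: the statement is the Claim_ definition above) =====
theorem solve_spec : Claim_equal_solve := by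
  intro n m board _ _
  unfold Spec_solve
  rw [solve_eq_pvOut, solve_alt_eq_pvOut]
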